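-- pv_equiv track=rewrite | github.com/Kubciooo/4SEM | Kompresja/lista 6/zad6.py | differential_decode
-- ===== SOURCE A (Python) =====
-- def differential_decode(pixels_array):
--     previous_x = (0,0,0)
--     new_pixels = []
--     for pixel in pixels_array:
--         new_pixel = tuple(pixel[j] + previous_x[j] for j in range(3))
--         previous_x = new_pixel
--         new_pixels.append(new_pixel)
--     return new_pixels
-- ===== SOURCE B (Python) =====
-- def differential_decode(pixels_array):
--     def prefix_sums(channel):
--         total, out = 0, []
--         for v in channel:
--             total += v
--             out.append(total)
--         return out
--     s0 = prefix_sums([p[0] for p in pixels_array])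
--     s1 = prefix_sums([p[1] for p in pixels_array])
--     s2 = prefix_sums([p[2] for p in pixels_array])
--     return list(zip(s0, s1, s2))
-- ===== Notes on version B (the rewrite author's own statement) =====
-- stated objective: alternative
-- what changed: B decodes channel-by-channel: it splits the pixels into three scalar channels, takes the running prefix sum of each channel independently, and zips the three sums back into pixel tuples, instead of A's single interleaved pass maintaining a running tuple.
import Mathlib
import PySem

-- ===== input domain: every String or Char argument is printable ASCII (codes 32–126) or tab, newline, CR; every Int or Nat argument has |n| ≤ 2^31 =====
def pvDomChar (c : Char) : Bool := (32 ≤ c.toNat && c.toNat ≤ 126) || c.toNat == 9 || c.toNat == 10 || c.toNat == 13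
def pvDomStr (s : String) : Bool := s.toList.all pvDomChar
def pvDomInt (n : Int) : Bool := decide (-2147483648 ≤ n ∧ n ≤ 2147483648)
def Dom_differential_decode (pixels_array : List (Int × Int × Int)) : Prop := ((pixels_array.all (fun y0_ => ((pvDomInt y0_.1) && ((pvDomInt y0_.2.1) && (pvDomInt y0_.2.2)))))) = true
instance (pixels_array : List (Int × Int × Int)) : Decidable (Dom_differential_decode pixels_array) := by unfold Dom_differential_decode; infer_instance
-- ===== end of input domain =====

-- B decodes channel-by-channel: three scalar prefix sums zipped back into tuples,
-- instead of A's single pass maintaining a running pixel tuple (objective: alternative decomposition).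

-- ===== PORT A =====
-- one interleaved pass: state = (previous_x, new_pixels)
def differential_decode (pixels_array : List (Int × Int × Int)) : List (Int × Int × Int) :=
  (pixels_array.foldl
    (fun (st : (Int × Int × Int) × List (Int × Int × Int)) pixel =>
      let new_pixel : Int × Int × Int :=
        (pixel.1 + st.1.1, pixel.2.1 + st.1.2.1, pixel.2.2 + st.1.2.2)
      (new_pixel, st.2 ++ [new_pixel]))
    ((0, 0, 0), [])).2

-- ===== PORT B =====
-- prefix_sums: running-total loop over one scalar channel
def pvPrefixSums (channel : List Int) : List Int :=
  (channel.foldl (fun (st : Int × List Int) v => (st.1 + v, st.2 ++ [st.1 + v])) (0, [])).2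

def differential_decode_alt (pixels_array : List (Int × Int × Int)) : List (Int × Int × Int) :=
  (pvPrefixSums (pixels_array.map (·.1))).zip
    ((pvPrefixSums (pixels_array.map (·.2.1))).zip (pvPrefixSums (pixels_array.map (·.2.2))))

-- ===== PRECONDITION & SPEC =====
def Spec_differential_decode (pixels_array : List (Int × Int × Int)) (out : List (Int × Int × Int)) : Prop := out = differential_decode_alt pixels_array
instance (pixels_array : List (Int × Int × Int)) (out : List (Int × Int × Int)) : Decidable (Spec_differential_decode pixels_array out) := by unfold Spec_differential_decode; infer_instance

-- ===== CLAIM (what is proved, stated in full; the proofs are below) =====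
def Claim_equal_differential_decode : Prop := ∀ (pixels_array : List (Int × Int × Int)), Dom_differential_decode pixels_array → Spec_differential_decode pixels_array (differential_decode pixels_array)

-- ===== LEMMAS AND PROOFS =====

-- reference decode from an arbitrary previous pixel
def pvDec (p : Int × Int × Int) : List (Int × Int × Int) → List (Int × Int × Int)
  | [] => []
  | x :: xs =>
      let np : Int × Int × Int := (x.1 + p.1, x.2.1 + p.2.1, x.2.2 + p.2.2)
      np :: pvDec np xs

-- reference prefix sums from an arbitrary running total
def pvPS (s : Int) : List Int → List Int
  | [] => []
  | v :: vs => (s + v) :: pvPS (s + v) vs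

theorem pvA_fold (xs : List (Int × Int × Int)) :
    ∀ (p : Int × Int × Int) (acc : List (Int × Int × Int)),
      (xs.foldl
        (fun (st : (Int × Int × Int) × List (Int × Int × Int)) pixel =>
          let new_pixel : Int × Int × Int :=
            (pixel.1 + st.1.1, pixel.2.1 + st.1.2.1, pixel.2.2 + st.1.2.2)
          (new_pixel, st.2 ++ [new_pixel]))
        (p, acc)).2 = acc ++ pvDec p xs := by
  induction xs with
  | nil => intro p acc; simp [pvDec]
  | cons x xs ih =>
      intro p acc
      simp only [List.foldl, pvDec]
      rw [ih]
      simp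

theorem pvB_fold (ch : List Int) :
    ∀ (s : Int) (acc : List Int),
      (ch.foldl (fun (st : Int × List Int) v => (st.1 + v, st.2 ++ [st.1 + v])) (s, acc)).2
        = acc ++ pvPS s ch := by
  induction ch with
  | nil => intro s acc; simp [pvPS]
  | cons v vs ih =>
      intro s acc
      simp only [List.foldl, pvPS]
      rw [ih]
      simp

theorem pvZip_dec (xs : List (Int × Int × Int)) :
    ∀ (p : Int × Int × Int),
      (pvPS p.1 (xs.map (·.1))).zip
        ((pvPS p.2.1 (xs.map (·.2.1))).zip (pvPS p.2.2 (xs.map (·.2.2))))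
        = pvDec p xs := by
  induction xs with
  | nil => intro p; simp [pvPS, pvDec]
  | cons x xs ih =>
      intro p
      simp only [List.map, pvPS, pvDec, List.zip_cons_cons]
      rw [show (x.1 + p.1, x.2.1 + p.2.1, x.2.2 + p.2.2)
            = ((x.1 + p.1, x.2.1 + p.2.1, x.2.2 + p.2.2) : Int × Int × Int) from rfl]
      have := ih (x.1 + p.1, x.2.1 + p.2.1, x.2.2 + p.2.2)
      simp only at this
      rw [show p.1 + x.1 = x.1 + p.1 from by ring,
          show p.2.1 + x.2.1 = x.2.1 + p.2.1 from by ring,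
          show p.2.2 + x.2.2 = x.2.2 + p.2.2 from by ring] at *
      exact congrArg _ this

-- ===== VERDICT (by name: the statement is the Claim_ definition above) =====
theorem differential_decode_spec : Claim_equal_differential_decode := by
  intro xs _
  unfold Spec_differential_decode differential_decode differential_decode_alt pvPrefixSums
  rw [pvA_fold, pvB_fold, pvB_fold, pvB_fold]
  simp only [List.nil_append]
  exact (pvZip_dec xs (0, 0, 0)).symm
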